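-- pv_equiv track=rewrite | github.com/Roth-Lab/cfClone-smk | scripts/plot_fit.py | sort_chroms
-- ===== SOURCE A (Python) =====
-- def sort_chroms(chroms):
--     numeric = []
--     string = []
--
--     if chroms[0].startswith("chr"):
--         chr_prefix = True
--     else:
--         chr_prefix = False
--
--     for c in chroms:
--         if chr_prefix:
--             c = c.replace("chr", "")
--         try:
--             numeric.append(int(c))
--         except ValueError:
--             string.append(c)
--
--     chroms = [str(x) for x in sorted(numeric)] + list(sorted(string))
--
--     if chr_prefix:
--         chroms = ["chr{}".format(x) for x in chroms]
--
--     return chroms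
-- ===== SOURCE B (Python) =====
-- def sort_chroms(chroms):
--     chr_prefix = chroms[0].startswith("chr")
--
--     def key(tok):
--         try:
--             return (0, int(tok), "")
--         except ValueError:
--             return (1, 0, tok)
--
--     toks = [c.replace("chr", "") if chr_prefix else c for c in chroms]
--     out = [t if key(t)[0] else str(key(t)[1]) for t in sorted(toks, key=key)]
--     if chr_prefix:
--         out = ["chr" + t for t in out]
--     return out
-- ===== Notes on version B (the rewrite author's own statement) =====
-- stated objective: alternative
-- what changed: Replaces A's two-bucket partition (numeric ints vs strings) with two separate sorts and a concatenation by a single stable sorted() over the stripped tokens under a composite (tag, int, str) key that places parseable-int tokens, ordered by value, before the rest, ordered lexically.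
import Mathlib
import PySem

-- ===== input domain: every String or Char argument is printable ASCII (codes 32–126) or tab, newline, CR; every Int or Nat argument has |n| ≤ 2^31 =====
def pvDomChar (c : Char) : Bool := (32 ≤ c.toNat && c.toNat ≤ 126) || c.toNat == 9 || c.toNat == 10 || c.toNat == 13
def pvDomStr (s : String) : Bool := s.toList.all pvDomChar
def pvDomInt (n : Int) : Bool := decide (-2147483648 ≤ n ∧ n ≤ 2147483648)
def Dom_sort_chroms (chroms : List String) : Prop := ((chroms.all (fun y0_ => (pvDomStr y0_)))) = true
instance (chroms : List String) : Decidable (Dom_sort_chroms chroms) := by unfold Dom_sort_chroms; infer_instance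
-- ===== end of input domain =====

-- B replaces A's two-bucket partition-and-concatenate by ONE stable keyed sort of the stripped
-- tokens under a composite (tag, int, str) key; same cost class, different decomposition ("alternative").

-- ===== PORT A =====
def sort_chroms (chroms : List String) : List String :=
  let chrPrefix := PySem.Str.startswith (PySem.List.pyGetD chroms 0 "") "chr"
  let p := chroms.foldl (fun (acc : List Int × List String) c0 =>
      let c := if chrPrefix then PySem.Str.replace c0 "chr" "" else c0
      match PySem.Int.ofStr? c with
      | some n => (acc.1 ++ [n], acc.2)
      | none   => (acc.1, acc.2 ++ [c])) ([], [])
  let out := (PySem.List.sorted p.1 (fun x => x) false).map PySem.Int.toStr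
             ++ PySem.List.sorted p.2 (fun x => x) false
  if chrPrefix then out.map (fun x => "chr" ++ x) else out

-- ===== PORT B =====
-- Python's lexicographic comparison of B's key tuples (0, int(t), "") / (1, 0, t), written out
-- component by component (Lean's Prod '<' is pointwise, not Python's tuple order).
def keyLt (a b : String) : Bool :=
  match PySem.Int.ofStr? a, PySem.Int.ofStr? b with
  | some m, some n => decide (m < n)
  | some _, none   => true
  | none,   some _ => false
  | none,   none   => decide (a < b)

-- sorted(toks, key=key): PySem's stable insertion sort (sorted_eq_foldl_insertBy, rfl) with the
-- tuple-lex comparator above.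
def altSorted (toks : List String) : List String :=
  toks.foldl (fun acc t => PySem.List.insertBy keyLt t acc) []

-- B's per-entry output: 't if key(t)[0] else str(key(t)[1])'
def altEmit (t : String) : String :=
  match PySem.Int.ofStr? t with
  | some n => PySem.Int.toStr n
  | none   => t

def sort_chroms_alt (chroms : List String) : List String :=
  let chrPrefix := PySem.Str.startswith (PySem.List.pyGetD chroms 0 "") "chr"
  let toks := chroms.map (fun c => if chrPrefix then PySem.Str.replace c "chr" "" else c)
  let out := (altSorted toks).map altEmit
  if chrPrefix then out.map (fun t => "chr" ++ t) else out

-- ===== PRECONDITION & SPEC =====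
-- A evaluates chroms[0]: on the empty list the Python raises IndexError (B does too), so
-- Pre_ excludes exactly the empty list.
def Pre_sort_chroms (chroms : List String) : Prop := chroms ≠ []
instance (chroms : List String) : Decidable (Pre_sort_chroms chroms) := by unfold Pre_sort_chroms; infer_instance
def pvWitness_sort_chroms : List String := ["chr2", "chr10", "chrX", "chr1"]
def Spec_sort_chroms (chroms : List String) (out : List String) : Prop := out = sort_chroms_alt chroms
instance (chroms : List String) (out : List String) : Decidable (Spec_sort_chroms chroms out) := by unfold Spec_sort_chroms; infer_instance

-- ===== CLAIM (what is proved, stated in full; the proofs are below) =====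
def Claim_equal_sort_chroms : Prop := ∀ (chroms : List String), Dom_sort_chroms chroms → Pre_sort_chroms chroms → Spec_sort_chroms chroms (sort_chroms chroms)

-- ===== LEMMAS AND PROOFS =====

-- proof-side view of B's key tuple, as a value of the lexicographic product
def altKey (t : String) : Lex (Nat × Lex (Int × String)) :=
  match PySem.Int.ofStr? t with
  | some n => toLex (0, toLex (n, ""))
  | none   => toLex (1, toLex (0, t))

lemma keyLt_eq (a b : String) : keyLt a b = decide (altKey a < altKey b) := by
  unfold keyLt altKey
  cases ha : PySem.Int.ofStr? a <;> cases hb : PySem.Int.ofStr? b <;>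
    simp [Prod.Lex.lt_iff]

lemma altSorted_eq_sorted (toks : List String) :
    altSorted toks = PySem.List.sorted toks altKey false := by
  rw [PySem.List.sorted_eq_foldl_insertBy]
  unfold altSorted
  have hk : keyLt = fun a b => decide (altKey a < altKey b) := by
    funext a b; exact keyLt_eq a b
  rw [hk]

def isNum (t : String) : Bool := (PySem.Int.ofStr? t).isSome

def keyN (t : String) : Int := (PySem.Int.ofStr? t).getD 0

lemma insertBy_append_left {α : Type} (before : α → α → Bool) (x : α) (A B : List α)
    (h : ∀ b ∈ B, before x b = true) :
    PySem.List.insertBy before x (A ++ B) = PySem.List.insertBy before x A ++ B := by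
  induction A with
  | nil =>
    cases B with
    | nil => rfl
    | cons b B' => simp [PySem.List.insertBy, h b (by simp)]
  | cons a A' ih =>
    simp only [List.cons_append, PySem.List.insertBy]
    split <;> simp [ih]

lemma insertBy_append_right {α : Type} (before : α → α → Bool) (x : α) (A B : List α)
    (h : ∀ a ∈ A, before x a = false) :
    PySem.List.insertBy before x (A ++ B) = A ++ PySem.List.insertBy before x B := by
  induction A with
  | nil => rfl
  | cons a A' ih =>
    simp only [List.cons_append, PySem.List.insertBy, h a (by simp)]
    simp only [Bool.false_eq_true, if_false, List.cons.injEq, true_and]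
    exact ih (fun a ha => h a (by simp [ha]))

lemma insertBy_congr {α : Type} (b1 b2 : α → α → Bool) (x : α) (ys : List α)
    (h : ∀ y ∈ ys, b1 x y = b2 x y) :
    PySem.List.insertBy b1 x ys = PySem.List.insertBy b2 x ys := by
  induction ys with
  | nil => rfl
  | cons y ys' ih =>
    simp only [PySem.List.insertBy, h y (by simp)]
    split <;> simp [ih (fun z hz => h z (by simp [hz]))]

lemma sorted_append_singleton {α κ : Type} [LT κ] [DecidableLT κ] (xs : List α) (x : α)
    (key : α → κ) :
    PySem.List.sorted (xs ++ [x]) key false =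
      PySem.List.insertBy (fun a b => decide (key a < key b)) x
        (PySem.List.sorted xs key false) := by
  rw [PySem.List.sorted_eq_foldl_insertBy, PySem.List.sorted_eq_foldl_insertBy,
    List.foldl_append]
  rfl

lemma sorted_key_congr {α κ₁ κ₂ : Type} [LinearOrder κ₁] [LinearOrder κ₂]
    (xs : List α) (k1 : α → κ₁) (k2 : α → κ₂)
    (h : ∀ a ∈ xs, ∀ b ∈ xs, (k1 a < k1 b ↔ k2 a < k2 b)) :
    PySem.List.sorted xs k1 false = PySem.List.sorted xs k2 false := by
  induction xs using List.reverseRecOn with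
  | nil => rw [PySem.List.sorted_eq_foldl_insertBy, PySem.List.sorted_eq_foldl_insertBy]; rfl
  | append_singleton xs x ih =>
    rw [sorted_append_singleton, sorted_append_singleton,
      ih (fun a ha b hb => h a (by simp [ha]) b (by simp [hb]))]
    apply insertBy_congr
    intro y hy
    have hy' : y ∈ xs := by rwa [PySem.List.mem_sorted] at hy
    have := h x (by simp) y (by simp [hy'])
    simp only [decide_eq_decide]
    exact this

-- the numeric tag (0) sorts strictly before the string tag (1)
lemma altKey_num_lt_str {a b : String} (ha : isNum a = true) (hb : isNum b = false) :
    altKey a < altKey b := by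
  obtain ⟨n, hn⟩ := Option.isSome_iff_exists.mp ha
  have hb' : PySem.Int.ofStr? b = none := by
    simpa [isNum, Option.isSome_iff_exists] using hb
  simp [altKey, hn, hb', Prod.Lex.lt_iff]

-- stable one-key sort splits into the numeric block followed by the string block
lemma sorted_altKey_split (xs : List String) :
    PySem.List.sorted xs altKey false =
      PySem.List.sorted (xs.filter isNum) altKey false ++
      PySem.List.sorted (xs.filter (fun t => !isNum t)) altKey false := by
  induction xs using List.reverseRecOn with
  | nil => rfl
  | append_singleton xs x ih =>
    rw [sorted_append_singleton, ih, List.filter_append, List.filter_append]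
    cases hx : isNum x with
    | true =>
      simp only [List.filter_singleton, hx, Bool.not_true, Bool.cond_true, Bool.cond_false,
        List.append_nil]
      rw [sorted_append_singleton,
        insertBy_append_left _ _ _ _ (fun b hb => ?_)]
      have hb : isNum b = false := by
        have := (PySem.List.mem_sorted _ _ _ _).mp hb
        simpa using (List.mem_filter.mp this).2
      simp [altKey_num_lt_str hx hb]
    | false =>
      simp only [List.filter_singleton, hx, Bool.not_false, Bool.cond_true, Bool.cond_false,
        List.append_nil]
      rw [sorted_append_singleton,
        insertBy_append_right _ _ _ _ (fun a ha => ?_)]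
      have ha : isNum a = true := by
        have := (PySem.List.mem_sorted _ _ _ _).mp ha
        simpa using (List.mem_filter.mp this).2
      have : ¬ altKey x < altKey a := by
        intro hlt
        exact absurd (lt_trans (altKey_num_lt_str ha hx) hlt) (lt_irrefl _)
      simpa using this

-- a stable sort of mapped keys by identity is the map of the keyed sort
lemma sorted_map_id {α κ : Type} [LinearOrder κ] (xs : List α) (k : α → κ) :
    PySem.List.sorted (xs.map k) (fun x => x) false =
      (PySem.List.sorted xs k false).map k :=
  PySem.List.sorted_id_eq_of_perm_of_pairwise _ _
    ((PySem.List.sorted_perm xs k false).map k)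
    (PySem.List.sorted_map_key_pairwise xs k)

lemma filterMap_eq_map_filter (xs : List String) :
    xs.filterMap PySem.Int.ofStr? = (xs.filter isNum).map keyN := by
  induction xs with
  | nil => rfl
  | cons x xs ih =>
    cases hx : PySem.Int.ofStr? x with
    | some n => simp [hx, isNum, keyN, ih]
    | none => simp [hx, isNum, ih]

-- on numeric tokens altKey orders exactly as keyN
lemma sorted_num_altKey (xs : List String) :
    PySem.List.sorted (xs.filter isNum) altKey false =
      PySem.List.sorted (xs.filter isNum) keyN false := by
  apply sorted_key_congr
  intro a ha b hb
  obtain ⟨na, hna⟩ := Option.isSome_iff_exists.mp (List.mem_filter.mp ha).2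
  obtain ⟨nb, hnb⟩ := Option.isSome_iff_exists.mp (List.mem_filter.mp hb).2
  simp [altKey, keyN, hna, hnb, Prod.Lex.lt_iff]

-- on string tokens altKey orders exactly as the identity
lemma sorted_str_altKey (xs : List String) :
    PySem.List.sorted (xs.filter (fun t => !isNum t)) altKey false =
      PySem.List.sorted (xs.filter (fun t => !isNum t)) (fun t => t) false := by
  apply sorted_key_congr
  intro a ha b hb
  have ha' : PySem.Int.ofStr? a = none := by
    simpa [isNum, Option.isSome_iff_exists] using (List.mem_filter.mp ha).2
  have hb' : PySem.Int.ofStr? b = none := by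
    simpa [isNum, Option.isSome_iff_exists] using (List.mem_filter.mp hb).2
  simp [altKey, ha', hb', Prod.Lex.lt_iff]

-- A's partition loop, as filterMap / filter of the token list
lemma foldA (toks : List String) (acc : List Int × List String) :
    toks.foldl (fun (acc : List Int × List String) c =>
        match PySem.Int.ofStr? c with
        | some n => (acc.1 ++ [n], acc.2)
        | none   => (acc.1, acc.2 ++ [c])) acc =
      (acc.1 ++ toks.filterMap PySem.Int.ofStr?,
       acc.2 ++ toks.filter (fun t => !isNum t)) := by
  induction toks generalizing acc with
  | nil => simp
  | cons c toks ih =>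
    cases hc : PySem.Int.ofStr? c with
    | some n => simp [List.foldl_cons, hc, ih, isNum]
    | none => simp [List.foldl_cons, hc, ih, isNum]

-- the central identity: A's two sorted buckets = B's single keyed sort, after emission
lemma core (toks : List String) :
    (PySem.List.sorted (toks.filterMap PySem.Int.ofStr?) (fun x => x) false).map PySem.Int.toStr
      ++ PySem.List.sorted (toks.filter (fun t => !isNum t)) (fun x => x) false =
    (PySem.List.sorted toks altKey false).map altEmit := by
  rw [sorted_altKey_split, List.map_append]
  congr 1
  · rw [sorted_num_altKey, filterMap_eq_map_filter, sorted_map_id, List.map_map]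
    apply List.map_congr_left
    intro t ht
    have := (PySem.List.mem_sorted _ _ _ _).mp ht
    obtain ⟨n, hn⟩ := Option.isSome_iff_exists.mp (List.mem_filter.mp this).2
    simp [altEmit, keyN, hn]
  · rw [sorted_str_altKey]
    have : ∀ t ∈ PySem.List.sorted (toks.filter (fun t => !isNum t)) (fun t => t) false,
        altEmit t = t := by
      intro t ht
      have := (PySem.List.mem_sorted _ _ _ _).mp ht
      have h0 : PySem.Int.ofStr? t = none := by
        simpa [isNum, Option.isSome_iff_exists] using (List.mem_filter.mp this).2
      simp [altEmit, h0]
    rw [List.map_congr_left this]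
    simp

-- ===== VERDICT (by name: the statement is the Claim_ definition above) =====
theorem sort_chroms_spec : Claim_equal_sort_chroms := by
  intro chroms _ _
  show sort_chroms chroms = sort_chroms_alt chroms
  unfold sort_chroms sort_chroms_alt
  simp only []
  set chrPrefix := PySem.Str.startswith (PySem.List.pyGetD chroms 0 "") "chr" with hpref
  have hfold :
      chroms.foldl (fun (acc : List Int × List String) c0 =>
        let c := if chrPrefix then PySem.Str.replace c0 "chr" "" else c0
        match PySem.Int.ofStr? c with
        | some n => (acc.1 ++ [n], acc.2)
        | none   => (acc.1, acc.2 ++ [c])) ([], []) =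
      ((chroms.map (fun c => if chrPrefix then PySem.Str.replace c "chr" "" else c)).filterMap
          PySem.Int.ofStr?,
       (chroms.map (fun c => if chrPrefix then PySem.Str.replace c "chr" "" else c)).filter
          (fun t => !isNum t)) := by
    rw [← List.foldl_map (f := fun c => if chrPrefix then PySem.Str.replace c "chr" "" else c)
      (g := fun (acc : List Int × List String) c =>
        match PySem.Int.ofStr? c with
        | some n => (acc.1 ++ [n], acc.2)
        | none   => (acc.1, acc.2 ++ [c]))]
    rw [foldA]
    simp
  rw [hfold]
  rw [core (chroms.map (fun c => if chrPrefix then PySem.Str.replace c "chr" "" else c))]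
  rw [altSorted_eq_sorted]
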